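-- pv_equiv track=rewrite | github.com/labe08/Introduction-to-Artificial-Intelligence | solution_lab3.py | checkTestList
-- ===== SOURCE A (Python) =====
-- def checkTestList(test_list):
--     i = 0
--     feature_to_remove = 0
--     value_to_remove = 0
--     while i <= len(test_list[0].split(','))-1:
--         value_set = set()
--         for test in test_list[1:]:
--             test = test.split(',')
--             value_set.add(test[i])
--         if len(value_set) == 1:
--             feature_to_remove = test_list[0].split(',')[i]
--             value_to_remove = test[i]
--         i+=1
--     if value_to_remove == 0 and feature_to_remove == 0:
--         return test_list
--     new_test_list = []
--     for row in test_list: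
--         test_row = []
--         row = row.split(',')
--         for r in row:
--             if r != feature_to_remove and r != value_to_remove:
--                 test_row.append(r)
--         test_row = ",".join(test_row)
--         new_test_list.append(test_row)
--     return new_test_list
-- ===== SOURCE B (Python) =====
-- def checkTestList(test_list):
--     header = test_list[0].split(',')
--     rows = [line.split(',') for line in test_list[1:]]
--     if not rows:
--         return test_list
--     vals = rows[0]
--     const = [True] * len(header)
--     for row in rows[1:]:
--         const = [c and row[i] == vals[i] for i, c in enumerate(const)]
--     pick = None
--     for i in range(len(header)):
--         if const[i]:
--             pick = (header[i], vals[i])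
--     if pick is None:
--         return test_list
--     f, v = pick
--     return [",".join(c for c in line.split(',') if c != f and c != v)
--             for line in test_list]
-- ===== Notes on version B (the rewrite author's own statement) =====
-- stated objective: alternative
-- what changed: B makes one row-major pass: it splits each row once and maintains a per-column boolean constancy vector updated incrementally row by row, instead of A's column-major outer loop that re-splits every tail row and builds a fresh value set for every column.
import Mathlib
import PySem

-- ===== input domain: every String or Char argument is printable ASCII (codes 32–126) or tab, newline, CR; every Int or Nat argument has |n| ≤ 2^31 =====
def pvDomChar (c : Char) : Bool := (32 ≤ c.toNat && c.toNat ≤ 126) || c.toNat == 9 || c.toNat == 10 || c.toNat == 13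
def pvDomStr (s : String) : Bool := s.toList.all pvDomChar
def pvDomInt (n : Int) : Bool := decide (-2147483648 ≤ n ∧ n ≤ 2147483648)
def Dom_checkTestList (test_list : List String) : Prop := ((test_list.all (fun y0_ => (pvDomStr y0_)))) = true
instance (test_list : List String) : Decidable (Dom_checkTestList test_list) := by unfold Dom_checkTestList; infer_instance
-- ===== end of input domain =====

-- B splits each row once and maintains a per-column boolean constancy vector updated
-- incrementally in one row-major pass, instead of A's column-major loop that re-splits
-- every tail row into a fresh value set for each column (alternative algorithm, same result).

-- ===== PORT A =====
-- s.split(',') — the separator is the nonempty literal ",", so Str.split? always returns some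
def pySplitComma (s : String) : List String := (PySem.Str.split? s ",").getD []

def checkTestList (test_list : List String) : List String :=
  let st := (PySem.List.pyRange 0
      ((pySplitComma (PySem.List.pyGetD test_list 0 "")).length : Int) 1).foldl
    (fun (st : Option String × Option String) i =>
      let p := (PySem.List.slice test_list (some 1) none).foldl
        (fun (q : PySem.Set String × List String) row =>
          let t := pySplitComma row
          (PySem.Set.add q.1 (PySem.List.pyGetD t i ""), t))
        (PySem.Set.empty, [])
      if PySem.Set.len p.1 = 1 then
        (some (PySem.List.pyGetD (pySplitComma (PySem.List.pyGetD test_list 0 "")) i ""),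
         some (PySem.List.pyGetD p.2 i ""))
      else st)
    (none, none)
  if st.2 = none ∧ st.1 = none then test_list
  else
    test_list.foldl (fun acc row =>
      let kept := (pySplitComma row).foldl (fun tr r =>
        if st.1 ≠ some r ∧ st.2 ≠ some r then tr ++ [r] else tr) []
      acc ++ [PySem.Str.join "," kept]) []

-- ===== PORT B =====
def checkTestList_alt (test_list : List String) : List String :=
  let header := pySplitComma (PySem.List.pyGetD test_list 0 "")
  let rows := (PySem.List.slice test_list (some 1) none).map pySplitComma
  match rows with
  | [] => test_list
  | vals :: rest =>
    let const := rest.foldl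
      (fun (const : List Bool) row =>
        (PySem.List.enumerate const 0).map (fun ic =>
          ic.2 && (PySem.List.pyGetD row ic.1 "" == PySem.List.pyGetD vals ic.1 "")))
      (List.replicate header.length true)
    let pick := (PySem.List.pyRange 0 (header.length : Int) 1).foldl
      (fun (pick : Option (String × String)) i =>
        if PySem.List.pyGetD const i false then
          some (PySem.List.pyGetD header i "", PySem.List.pyGetD vals i "")
        else pick) none
    match pick with
    | none => test_list
    | some (f, v) =>
      test_list.map (fun line =>
        PySem.Str.join "," ((pySplitComma line).filter (fun c => c != f && c != v)))

-- ===== PRECONDITION & SPEC =====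
-- Pre_ excludes exactly the inputs where A raises IndexError: the empty list (test_list[0])
-- and lists with a tail row that splits into fewer columns than the header (test[i]).
def Pre_checkTestList (test_list : List String) : Prop :=
  test_list ≠ [] ∧ ∀ row ∈ test_list.drop 1,
    (pySplitComma (test_list.headD "")).length ≤ (pySplitComma row).length
instance (test_list : List String) : Decidable (Pre_checkTestList test_list) := by
  unfold Pre_checkTestList; infer_instance
def pvWitness_checkTestList : List String := ["a,b", "x,y", "x,z"]

def Spec_checkTestList (test_list : List String) (out : List String) : Prop := out = checkTestList_alt test_list
instance (test_list : List String) (out : List String) : Decidable (Spec_checkTestList test_list out) := by unfold Spec_checkTestList; infer_instance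

-- ===== CLAIM (what is proved, stated in full; the proofs are below) =====
def Claim_equal_checkTestList : Prop := ∀ (test_list : List String), Dom_checkTestList test_list → Pre_checkTestList test_list → Spec_checkTestList test_list (checkTestList test_list)

-- ===== LEMMAS AND PROOFS =====

-- the value of row r's split at column i (with Lean's total default; Pre_ keeps Python in range)
def pvG (i : Int) (r : String) : String := PySem.List.pyGetD (pySplitComma r) i ""

theorem pv_inner (i : Int) (l : List String) (hl : l ≠ []) (s : PySem.Set String) (t : List String) :
    l.foldl (fun (q : PySem.Set String × List String) row =>
        (PySem.Set.add q.1 (PySem.List.pyGetD (pySplitComma row) i ""), pySplitComma row)) (s, t)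
      = (l.foldl (fun s' row => PySem.Set.add s' (pvG i row)) s, pySplitComma (l.getLastD "")) := by
  induction l generalizing s t with
  | nil => exact absurd rfl hl
  | cons x xs ih =>
    cases xs with
    | nil => simp [pvG]
    | cons y ys =>
      have := ih (by simp) (PySem.Set.add s (PySem.List.pyGetD (pySplitComma x) i ""))
        (pySplitComma x)
      simpa [pvG, List.getLastD_cons] using this

theorem pv_set_eq (i : Int) (l : List String) :
    l.foldl (fun s' row => PySem.Set.add s' (pvG i row)) PySem.Set.empty
      = PySem.Set.ofList (l.map (pvG i)) := by
  rw [← PySem.Set.update_map_eq_foldl_add, PySem.Set.update_empty]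

theorem pv_len_one (x0 : String) (xr : List String) :
    PySem.Set.len (PySem.Set.ofList (x0 :: xr)) = 1 ↔ ∀ x ∈ xr, x = x0 := by
  rw [PySem.Set.ofList_cons]
  simp only [PySem.Set.len, List.length_cons]
  constructor
  · intro hlen x hx
    have h0 : (((PySem.Set.ofList xr).discard x0).length : Int) = 0 := by omega
    have hnil : (PySem.Set.ofList xr).discard x0 = [] :=
      List.length_eq_zero_iff.mp (by exact_mod_cast h0)
    by_contra hne
    have : x ∈ (PySem.Set.ofList xr).discard x0 :=
      (PySem.Set.mem_discard _ _ _).mpr ⟨(PySem.Set.mem_ofList _ _).mpr hx, hne⟩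
    simp [hnil] at this
  · intro hall
    have hnil : (PySem.Set.ofList xr).discard x0 = [] := by
      apply List.eq_nil_iff_forall_not_mem.mpr
      intro x hx
      have hm := (PySem.Set.mem_discard _ _ _).mp hx
      exact hm.2 (hall x ((PySem.Set.mem_ofList _ _).mp hm.1))
    simp [hnil]

-- A's step at one column, in closed form
theorem pv_stepA_eq (hd r0 : String) (rx : List String)
    (st : Option String × Option String) (i : Int) :
    (if PySem.Set.len ((r0 :: rx).foldl
        (fun (q : PySem.Set String × List String) row =>
          (PySem.Set.add q.1 (PySem.List.pyGetD (pySplitComma row) i ""), pySplitComma row))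
        (PySem.Set.empty, [])).1 = 1 then
        (some (PySem.List.pyGetD (pySplitComma hd) i ""),
         some (PySem.List.pyGetD ((r0 :: rx).foldl
        (fun (q : PySem.Set String × List String) row =>
          (PySem.Set.add q.1 (PySem.List.pyGetD (pySplitComma row) i ""), pySplitComma row))
        (PySem.Set.empty, [])).2 i ""))
      else st)
    = if rx.all (fun r => pvG i r == pvG i r0) then
        (some (PySem.List.pyGetD (pySplitComma hd) i ""), some (pvG i r0))
      else st := by
  rw [pv_inner i (r0 :: rx) (by simp)]
  simp only [pv_set_eq, List.map_cons]
  by_cases hc : ∀ x ∈ rx.map (pvG i), x = pvG i r0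
  · have h1 : PySem.Set.len (PySem.Set.ofList (pvG i r0 :: rx.map (pvG i))) = 1 :=
      (pv_len_one _ _).mpr hc
    have hlast : pvG i ((r0 :: rx).getLastD "") = pvG i r0 := by
      have hmem : (r0 :: rx).getLastD "" ∈ r0 :: rx := by
        rw [List.getLastD_cons]
        exact List.getLastD_mem_cons
      rcases List.mem_cons.mp hmem with h | h
      · rw [h]
      · exact hc _ (List.mem_map_of_mem h)
    have h2 : rx.all (fun r => pvG i r == pvG i r0) = true := by
      simp only [List.all_eq_true, beq_iff_eq]
      intro r hr; exact hc _ (List.mem_map_of_mem hr)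
    rw [if_pos h1, if_pos h2]
    have hv : PySem.List.pyGetD (pySplitComma ((r0 :: rx).getLastD "")) i "" = pvG i r0 := hlast
    rw [hv]
  · have h1 : ¬ PySem.Set.len (PySem.Set.ofList (pvG i r0 :: rx.map (pvG i))) = 1 := by
      rw [pv_len_one]; exact hc
    have h2 : rx.all (fun r => pvG i r == pvG i r0) = false := by
      rw [List.all_eq_false]
      push Not at hc
      obtain ⟨x, hx, hne⟩ := hc
      obtain ⟨r, hr, rfl⟩ := List.mem_map.mp hx
      exact ⟨r, hr, by simpa using hne⟩
    rw [if_neg h1, h2]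
    simp

-- B's per-row update of the constancy vector, elementwise
theorem pv_constStep_getElem? (vals row : List String) (cs : List Bool) (k : Nat) :
    ((PySem.List.enumerate cs 0).map (fun ic =>
        ic.2 && (PySem.List.pyGetD row ic.1 "" == PySem.List.pyGetD vals ic.1 "")))[k]?
    = (cs[k]?).map (fun b =>
        b && (PySem.List.pyGetD row (k : Int) "" == PySem.List.pyGetD vals (k : Int) "")) := by
  rw [List.getElem?_map, PySem.List.getElem?_enumerate]
  cases h : cs[k]? <;> simp [h]

-- B's whole row-major fold, elementwise: column k stays constant iff every row agrees with vals at k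
theorem pv_constFold_getElem? (vals : List String) (rest : List (List String)) (cs : List Bool) (k : Nat) :
    (rest.foldl (fun (const : List Bool) row =>
        (PySem.List.enumerate const 0).map (fun ic =>
          ic.2 && (PySem.List.pyGetD row ic.1 "" == PySem.List.pyGetD vals ic.1 ""))) cs)[k]?
    = (cs[k]?).map (fun b =>
        b && rest.all (fun r => PySem.List.pyGetD r (k : Int) "" == PySem.List.pyGetD vals (k : Int) "")) := by
  induction rest generalizing cs with
  | nil => cases h : cs[k]? <;> simp [h]
  | cons r rs ih =>
    rw [List.foldl_cons, ih, pv_constStep_getElem?]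
    cases h : cs[k]? <;> simp [h, Bool.and_assoc]

theorem pv_constFold_length (vals : List String) (rest : List (List String)) (cs : List Bool) :
    (rest.foldl (fun (const : List Bool) row =>
        (PySem.List.enumerate const 0).map (fun ic =>
          ic.2 && (PySem.List.pyGetD row ic.1 "" == PySem.List.pyGetD vals ic.1 ""))) cs).length
      = cs.length := by
  induction rest generalizing cs with
  | nil => rfl
  | cons r rs ih => rw [List.foldl_cons, ih, List.length_map, PySem.List.length_enumerate]

-- the final constancy bit at an in-range column i equals A's all-rows-agree condition
theorem pv_condB (r0 : String) (rx : List String) (n : Nat) (i : Int)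
    (hi0 : 0 ≤ i) (hin : i < (n : Int)) :
    PySem.List.pyGetD
      ((rx.map pySplitComma).foldl (fun (const : List Bool) row =>
        (PySem.List.enumerate const 0).map (fun ic =>
          ic.2 && (PySem.List.pyGetD row ic.1 "" == PySem.List.pyGetD (pySplitComma r0) ic.1 "")))
        (List.replicate n true))
      i false
    = rx.all (fun r => pvG i r == pvG i r0) := by
  have hkn : i.toNat < n := by omega
  have hi : ((i.toNat : Nat) : Int) = i := Int.toNat_of_nonneg hi0
  have hlen := pv_constFold_length (pySplitComma r0) (rx.map pySplitComma) (List.replicate n true)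
  have hlt : i.toNat < ((rx.map pySplitComma).foldl (fun (const : List Bool) row =>
        (PySem.List.enumerate const 0).map (fun ic =>
          ic.2 && (PySem.List.pyGetD row ic.1 "" == PySem.List.pyGetD (pySplitComma r0) ic.1 "")))
        (List.replicate n true)).length := by
    rw [hlen, List.length_replicate]; exact hkn
  rw [PySem.List.pyGetD_eq_getElem _ _ hi0 (by omega)]
  have hgk := pv_constFold_getElem? (pySplitComma r0) (rx.map pySplitComma) (List.replicate n true) i.toNat
  have hrep : (List.replicate n true)[i.toNat]? = some true := by simp [hkn]
  rw [List.getElem?_eq_getElem hlt, hrep, Option.map_some] at hgk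
  have h := Option.some.inj hgk
  rw [h, Bool.true_and, List.all_map, hi]
  simp [Function.comp_def, pvG]

def pvRel (st : Option String × Option String) (o : Option (String × String)) : Prop :=
  (st = (none, none) ∧ o = none) ∨ ∃ p : String × String, st = (some p.1, some p.2) ∧ o = some p

theorem pv_fold_rel (C C' : Int → Bool) (F V F' V' : Int → String) (L : List Int)
    (hCC : ∀ i ∈ L, C i = C' i ∧ F i = F' i ∧ V i = V' i)
    (st : Option String × Option String) (o : Option (String × String)) (h : pvRel st o) :
    pvRel (L.foldl (fun st i => if C i then (some (F i), some (V i)) else st) st)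
          (L.foldl (fun o i => if C' i then some (F' i, V' i) else o) o) := by
  induction L generalizing st o with
  | nil => exact h
  | cons i L ih =>
    obtain ⟨hc, hf, hv⟩ := hCC i (by simp)
    have hrest : ∀ j ∈ L, C j = C' j ∧ F j = F' j ∧ V j = V' j :=
      fun j hj => hCC j (List.mem_cons_of_mem _ hj)
    simp only [List.foldl_cons, ← hc, ← hf, ← hv]
    by_cases hci : C i
    · exact ih hrest _ _ (Or.inr ⟨(F i, V i), by simp [hci]⟩)
    · simpa [hci] using ih hrest _ _ h

theorem pv_rebuild (tl : List String) (f v : String) :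
    tl.foldl (fun acc row =>
        acc ++ [PySem.Str.join ","
          ((pySplitComma row).foldl (fun tr r =>
            if some f ≠ some r ∧ some v ≠ some r then tr ++ [r] else tr) [])]) []
      = tl.map (fun line =>
          PySem.Str.join "," ((pySplitComma line).filter (fun c => c != f && c != v))) := by
  have hcond : ∀ r : String, (some f ≠ some r ∧ some v ≠ some r) ↔ ((r != f && r != v) = true) := by
    intro r
    simp only [ne_eq, Option.some.injEq, Bool.and_eq_true, bne_iff_ne]
    exact ⟨fun h => ⟨fun e => h.1 e.symm, fun e => h.2 e.symm⟩,
           fun h => ⟨fun e => h.1 e.symm, fun e => h.2 e.symm⟩⟩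
  have hinner : ∀ row : List String,
      row.foldl (fun tr r => if some f ≠ some r ∧ some v ≠ some r then tr ++ [r] else tr) []
        = row.filter (fun c => c != f && c != v) := by
    intro row
    have : (fun (tr : List String) (r : String) =>
        if some f ≠ some r ∧ some v ≠ some r then tr ++ [r] else tr)
        = fun tr r => if (fun c => c != f && c != v) r = true then tr ++ [(id r : String)] else tr := by
      funext tr r
      by_cases h : some f ≠ some r ∧ some v ≠ some r
      · rw [if_pos h, if_pos ((hcond r).mp h)]; rfl
      · rw [if_neg h, if_neg (fun hb => h ((hcond r).mpr hb))]
    rw [this, PySem.List.foldl_append_if]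
    simp only [List.nil_append]
    exact List.map_id _
  rw [PySem.List.foldl_append_singleton_eq_map]
  simp only [List.nil_append]
  apply List.map_congr_left
  intro row _
  rw [hinner]

theorem pv_eq (tl : List String) : checkTestList tl = checkTestList_alt tl := by
  cases tl with
  | nil => rfl
  | cons hd t0 =>
    cases t0 with
    | nil =>
      simp only [checkTestList, checkTestList_alt,
        PySem.List.slice_from (xs := [hd]) (a := 1) (by norm_num : (0:Int) ≤ 1),
        Int.toNat_one, List.drop_succ_cons, List.drop_nil, List.map_nil, List.foldl_nil]
      simp [PySem.Set.len, PySem.Set.empty]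
    | cons r0 rx =>
      simp only [checkTestList, checkTestList_alt, PySem.List.pyGetD_zero_cons,
        PySem.List.slice_from (xs := hd :: r0 :: rx) (a := 1) (by norm_num : (0:Int) ≤ 1),
        Int.toNat_one, List.drop_succ_cons, List.drop_zero, List.map_cons]
      simp only [pv_stepA_eq]
      have hrel := pv_fold_rel
        (fun i => rx.all (fun r => pvG i r == pvG i r0))
        (fun i => PySem.List.pyGetD
          ((rx.map pySplitComma).foldl (fun (const : List Bool) row =>
            (PySem.List.enumerate const 0).map (fun ic =>
              ic.2 && (PySem.List.pyGetD row ic.1 "" == PySem.List.pyGetD (pySplitComma r0) ic.1 "")))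
            (List.replicate (pySplitComma hd).length true)) i false)
        (fun i => PySem.List.pyGetD (pySplitComma hd) i "")
        (fun i => pvG i r0)
        (fun i => PySem.List.pyGetD (pySplitComma hd) i "")
        (fun i => PySem.List.pyGetD (pySplitComma r0) i "")
        (PySem.List.pyRange 0 ((pySplitComma hd).length : Int) 1)
        (by
          intro i hi
          rcases (PySem.List.mem_pyRange_one).mp hi with ⟨hi0, hin⟩
          exact ⟨(pv_condB r0 rx (pySplitComma hd).length i hi0 (by exact_mod_cast hin)).symm,
                 rfl, rfl⟩)
        (none, none) none (Or.inl ⟨rfl, rfl⟩)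
      beta_reduce at hrel
      rcases hrel with ⟨ha, hb⟩ | ⟨⟨f, v⟩, ha, hb⟩
      · rw [ha, hb]
        simp
      · rw [ha, hb]
        have hre := pv_rebuild (hd :: r0 :: rx) f v
        simpa using hre

-- ===== VERDICT (by name: the statement is the Claim_ definition above) =====
theorem checkTestList_spec : Claim_equal_checkTestList := by
  intro tl _ _
  exact pv_eq tl
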